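-- pv_equiv track=rewrite | github.com/pombredanne/nufix_elder | SAT_risky/solver_sat_risky.py | intercept_version
-- ===== SOURCE A (Python) =====
-- def intercept_version(version):
--     version_list=version.split(".")
--     new_version=""
--     if len(version_list)>3:
--         for i in range(3):
--             new_version=new_version+version_list[i]+"."
--         new_version=new_version[0:-1]
--     else:
--         new_version=version
--     return new_version
-- ===== SOURCE B (Python) =====
-- def intercept_version(version):
--     count = 0
--     i = 0
--     for ch in version:
--         if ch == '.':
--             count = count + 1
--             if count == 3:
--                 return version[:i]
--         i = i + 1
--     return version
-- ===== Notes on version B (the rewrite author's own statement) =====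
-- stated objective: idiomatic
-- what changed: B scans the string once and cuts at the index of the third dot, instead of splitting into a list, rejoining the first three components in a loop and stripping the trailing dot.
import Mathlib
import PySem

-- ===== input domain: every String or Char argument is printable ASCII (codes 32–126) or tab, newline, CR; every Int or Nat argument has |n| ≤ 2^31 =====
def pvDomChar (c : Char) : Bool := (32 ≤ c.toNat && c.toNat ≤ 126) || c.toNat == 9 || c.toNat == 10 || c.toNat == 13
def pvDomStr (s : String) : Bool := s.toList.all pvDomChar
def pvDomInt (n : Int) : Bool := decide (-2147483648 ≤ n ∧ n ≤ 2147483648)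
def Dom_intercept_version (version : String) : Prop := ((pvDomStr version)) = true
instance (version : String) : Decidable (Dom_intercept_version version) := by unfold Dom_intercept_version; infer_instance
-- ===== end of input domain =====

-- B cuts the string at the index of the third '.' in one scan instead of A's split / rejoin / strip-trailing-dot; same values, idiomatic restructuring.

-- ===== PORT A =====
-- version.split(".") with the non-empty separator "." never raises, so split? is always `some`;
-- the `none` branch is unreachable. version_list[i] is in range because the list has length > 3
-- and i ∈ {0,1,2}, so getD's default is unreachable too.
def intercept_version (version : String) : String :=
  match PySem.Chars.split? version.toList ['.'] with
  | none => version
  | some version_list =>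
    if version_list.length > 3 then
      let new_version := (PySem.List.pyRange 0 3 1).foldl
        (fun acc i => acc ++ (PySem.List.pyGet? version_list i).getD [] ++ ['.'])
        ([] : List Char)
      String.ofList (PySem.Chars.slice new_version none (some (-1)))
    else version

-- ===== PORT B =====
-- `for ch in version` with the running index i and dot counter; on the third dot return version[:i].
def interceptGo (version : String) : List Char → Nat → Nat → String
  | [], _, _ => version
  | ch :: rest, i, count =>
    if ch = '.' then
      if count + 1 = 3 then
        String.ofList (PySem.Chars.slice version.toList none (some (i : Int)))
      else interceptGo version rest (i + 1) (count + 1)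
    else interceptGo version rest (i + 1) count

def intercept_version_alt (version : String) : String :=
  interceptGo version version.toList 0 0

-- ===== PRECONDITION & SPEC =====
def Spec_intercept_version (version : String) (out : String) : Prop := out = intercept_version_alt version
instance (version : String) (out : String) : Decidable (Spec_intercept_version version out) := by unfold Spec_intercept_version; infer_instance

-- ===== CLAIM (what is proved, stated in full; the proofs are below) =====
def Claim_equal_intercept_version : Prop := ∀ (version : String), Dom_intercept_version version → Spec_intercept_version version (intercept_version version)

-- ===== LEMMAS AND PROOFS =====

-- simple recursive model of splitting on '.'
def sd : List Char → List (List Char)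
  | [] => [[]]
  | c :: rest =>
    if c = '.' then [] :: sd rest
    else
      match sd rest with
      | [] => [[c]]
      | p :: ps => (c :: p) :: ps

theorem sd_ne_nil (l : List Char) : sd l ≠ [] := by
  cases l with
  | nil => simp [sd]
  | cons c rest =>
    simp only [sd]
    split
    · simp
    · cases h : sd rest <;> simp

theorem go_spec (fuel : Nat) : ∀ (l cur : List Char) (acc : List (List Char)),
    l.length < fuel →
    PySem.Chars.splitOn.go ['.'] fuel l cur acc
      = acc.reverse ++ (sd l).modifyHead (cur.reverse ++ ·) := by
  induction fuel with
  | zero => intro l cur acc h; omega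
  | succ f ih =>
    intro l cur acc h
    cases l with
    | nil =>
      simp [PySem.Chars.splitOn.go, sd]
    | cons c rest =>
      rw [PySem.Chars.splitOn.go]
      by_cases hc : c = '.'
      · subst hc
        simp only [List.isPrefixOf, beq_self_eq_true, Bool.and_true,
          if_pos]
        simp only [List.length_cons, List.drop_succ_cons, List.drop_zero, List.length_nil]
        rw [ih rest [] (cur.reverse :: acc) (by simpa using Nat.lt_of_succ_lt_succ h)]
        obtain ⟨p, ps, hps⟩ : ∃ p ps, sd rest = p :: ps := by
          cases hsd : sd rest with
          | nil => exact absurd hsd (sd_ne_nil rest)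
          | cons p ps => exact ⟨p, ps, rfl⟩
        simp [sd, hps]
      · have hpre : List.isPrefixOf ['.'] (c :: rest) = false := by
          simp [List.isPrefixOf]
          intro hx; exact absurd hx.symm hc
        rw [hpre]
        simp only [Bool.false_eq_true, if_false]
        rw [ih rest (c :: cur) acc (by simpa using Nat.lt_of_succ_lt_succ h)]
        obtain ⟨p, ps, hps⟩ : ∃ p ps, sd rest = p :: ps := by
          cases hsd : sd rest with
          | nil => exact absurd hsd (sd_ne_nil rest)
          | cons p ps => exact ⟨p, ps, rfl⟩
        simp [sd, hc, hps]

theorem splitOn_eq_sd (l : List Char) : PySem.Chars.splitOn l ['.'] = sd l := by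
  rw [PySem.Chars.splitOn, go_spec (l.length + 1) l [] [] (by omega)]
  obtain ⟨p, ps, hps⟩ : ∃ p ps, sd l = p :: ps := by
    cases hsd : sd l with
    | nil => exact absurd hsd (sd_ne_nil l)
    | cons p ps => exact ⟨p, ps, rfl⟩
  simp [hps]

theorem sd_length (l : List Char) : (sd l).length = l.count '.' + 1 := by
  induction l with
  | nil => simp [sd]
  | cons c rest ih =>
    simp only [sd]
    by_cases hc : c = '.'
    · subst hc; simp [ih]
    · cases hps : sd rest with
      | nil => exact absurd hps (sd_ne_nil rest)
      | cons p ps =>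
        simp [hc]
        rw [hps] at ih; simpa using ih

-- join pieces with '.'
def jd : List (List Char) → List Char
  | [] => []
  | [p] => p
  | p :: ps@(_ :: _) => p ++ '.' :: jd ps

-- index (0-based position in l) of the n-th dot, meaningful when 1 ≤ n ≤ l.count '.'
def bidx : List Char → Nat → Nat
  | [], _ => 0
  | c :: rest, n =>
    if c = '.' then (if n = 1 then 0 else 1 + bidx rest (n - 1))
    else 1 + bidx rest n

theorem jd_take (l : List Char) : ∀ n : Nat, 1 ≤ n →
    jd ((sd l).take n) = if n ≤ l.count '.' then l.take (bidx l n) else l := by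
  induction l with
  | nil =>
    intro n hn
    simp only [sd, List.count_nil]
    rw [if_neg (by omega)]
    match n, hn with
    | (m+1), _ => simp [jd]
  | cons c rest ih =>
    intro n hn
    by_cases hc : c = '.'
    · subst hc
      simp only [sd, List.count_cons, bidx, beq_self_eq_true, if_true]
      by_cases h1 : n = 1
      · subst h1
        simp [jd]
      · have h2 : 2 ≤ n := by omega
        obtain ⟨m, rfl⟩ : ∃ m, n = m + 1 := ⟨n - 1, by omega⟩
        have hm : 1 ≤ m := by omega
        rw [List.take_succ_cons]
        have hjd : jd ([] :: (sd rest).take m) = '.' :: jd ((sd rest).take m) := by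
          cases hps : sd rest with
          | nil => exact absurd hps (sd_ne_nil rest)
          | cons p ps =>
            cases m with
            | zero => omega
            | succ m' => simp [jd]
        rw [hjd, ih m hm, if_neg h1]
        by_cases hle : m ≤ rest.count '.'
        · rw [if_pos hle, if_pos (by omega)]
          simp [Nat.add_comm]
        · rw [if_neg hle, if_neg (by omega)]
    · cases hps : sd rest with
      | nil => exact absurd hps (sd_ne_nil rest)
      | cons p ps =>
        simp only [sd, if_neg hc, hps, List.count_cons, bidx]
        have hcne : (c == '.') = false := by simpa using hc
        simp only [hcne, Bool.false_eq_true, if_false, add_zero]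
        obtain ⟨m, rfl⟩ : ∃ m, n = m + 1 := ⟨n - 1, by omega⟩
        rw [List.take_succ_cons]
        have hjd : jd ((c :: p) :: ps.take m) = c :: jd (p :: ps.take m) := by
          cases m with
          | zero => simp [jd]
          | succ m' =>
            cases hpt : ps.take (m' + 1) with
            | nil => simp [jd]
            | cons q qs => simp [jd]
        rw [hjd]
        have := ih (m + 1) hn
        rw [hps, List.take_succ_cons] at this
        rw [this]
        split
        · rw [Nat.add_comm 1 _, List.take_succ_cons]
        · rfl

theorem interceptGo_spec (version : String) : ∀ (l : List Char) (k cnt : Nat), cnt ≤ 2 →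
    interceptGo version l k cnt
      = if 3 - cnt ≤ l.count '.'
          then String.ofList (version.toList.take (k + bidx l (3 - cnt)))
          else version := by
  intro l
  induction l with
  | nil => intro k cnt hcnt; rw [interceptGo, if_neg (by simp; omega)]
  | cons ch rest ih =>
    intro k cnt hcnt
    rw [interceptGo]
    by_cases hc : ch = '.'
    · subst hc
      rw [if_pos rfl]
      by_cases h2 : cnt = 2
      · subst h2
        rw [if_pos rfl, if_pos (by simp)]
        simp [bidx, PySem.Chars.slice_eq_listSlice, PySem.List.slice_to_natCast]
      · rw [if_neg (by omega), ih (k + 1) (cnt + 1) (by omega)]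
        have hcount : (3 - cnt ≤ (List.count '.' ('.' :: rest))) ↔ (3 - (cnt + 1) ≤ rest.count '.') := by
          simp; omega
        have hb : bidx ('.' :: rest) (3 - cnt) = 1 + bidx rest (3 - (cnt + 1)) := by
          rw [bidx, if_pos rfl, if_neg (by omega)]
          congr 1
        by_cases hle : 3 - (cnt + 1) ≤ rest.count '.'
        · rw [if_pos hle, if_pos (hcount.mpr hle), hb]
          congr 2
          omega
        · rw [if_neg hle, if_neg (fun h => hle (hcount.mp h))]
    · rw [if_neg hc, ih (k + 1) cnt hcnt]
      have hcne : (ch == '.') = false := by simpa using hc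
      have hb : bidx (ch :: rest) (3 - cnt) = 1 + bidx rest (3 - cnt) := by
        rw [bidx, if_neg hc]
      rw [List.count_cons, hcne]
      simp only [Bool.false_eq_true, if_false, add_zero, hb]
      split
      · congr 2; omega
      · rfl

-- ===== VERDICT (by name: the statement is the Claim_ definition above) =====
theorem intercept_version_spec : Claim_equal_intercept_version := by
  intro version _
  unfold Spec_intercept_version intercept_version intercept_version_alt
  rw [show PySem.Chars.split? version.toList ['.']
      = some (sd version.toList) from by
        simp [PySem.Chars.split?, splitOn_eq_sd]]
  simp only
  rw [interceptGo_spec version version.toList 0 0 (by omega)]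
  have hlen := sd_length version.toList
  by_cases h3 : 3 ≤ version.toList.count '.'
  · rw [if_pos (by omega), if_pos h3]
    obtain ⟨p0, p1, p2, p3, tl, hps⟩ :
        ∃ p0 p1 p2 p3 tl, sd version.toList = p0 :: p1 :: p2 :: p3 :: tl := by
      match hsd : sd version.toList, (by omega : 4 ≤ (sd version.toList).length) with
      | p0 :: p1 :: p2 :: p3 :: tl, _ => exact ⟨p0, p1, p2, p3, tl, rfl⟩
    have hjd := jd_take version.toList 3 (by omega)
    rw [if_pos h3, hps] at hjd
    simp only [List.take_succ_cons, List.take_zero, jd] at hjd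
    have hrange : PySem.List.pyRange 0 3 1 = [0, 1, 2] := by decide
    have g0 : PySem.List.pyGet? (p0 :: p1 :: p2 :: p3 :: tl) (0 : Int) = some p0 := by
      simp [PySem.List.pyGet?, PySem.List.pyIdx?]
      rw [if_pos (by omega)]; simp
    have g1 : PySem.List.pyGet? (p0 :: p1 :: p2 :: p3 :: tl) (1 : Int) = some p1 := by
      simp [PySem.List.pyGet?, PySem.List.pyIdx?]
      rw [if_pos (by omega)]; simp
    have g2 : PySem.List.pyGet? (p0 :: p1 :: p2 :: p3 :: tl) (2 : Int) = some p2 := by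
      simp [PySem.List.pyGet?, PySem.List.pyIdx?]
      rw [if_pos (by omega)]; simp
    rw [hps, hrange]
    simp only [List.foldl, g0, g1, g2, Option.getD_some, List.nil_append]
    rw [PySem.Chars.slice_eq_listSlice, PySem.List.slice_to_neg_one]
    congr 1
    have hd : (p0 ++ ['.'] ++ p1 ++ ['.'] ++ p2 ++ ['.']).dropLast
        = p0 ++ '.' :: (p1 ++ '.' :: p2) := by
      rw [show p0 ++ ['.'] ++ p1 ++ ['.'] ++ p2 ++ ['.']
          = (p0 ++ '.' :: (p1 ++ '.' :: p2)) ++ ['.'] from by simp,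
        List.dropLast_concat]
    rw [hd, hjd]
    norm_num
  · rw [if_neg (by omega), if_neg h3]
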